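-- pv_equiv track=rewrite | github.com/ElysiumCodes/pokemonfinder | finder.py | get_the_pokemon
-- ===== SOURCE A (Python) =====
-- def get_the_pokemon(clue,names):
--     matches=[]
--     for name in names:
--         for i,j in zip(clue,name):
--             if i not in [j, '_']:
--                 break
--         else:
--             matches.append(name)
--     return matches
-- ===== SOURCE B (Python) =====
-- def get_the_pokemon(clue, names):
--     candidates = list(names)
--     limit = min(len(clue), max((len(n) for n in names), default=0))
--     for i in range(limit):
--         c = clue[i]
--         candidates = [n for n in candidates if len(n) <= i or c == '_' or n[i] == c]
--     return candidates
-- ===== Notes on version B (the rewrite author's own statement) =====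
-- stated objective: alternative
-- what changed: Instead of testing each name against the whole clue with an inner zip/break loop, B iterates over clue positions (capped at the longest name length) and repeatedly narrows one working candidate list, keeping names shorter than the position, matching it, or where the clue has '_'.
import Mathlib
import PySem

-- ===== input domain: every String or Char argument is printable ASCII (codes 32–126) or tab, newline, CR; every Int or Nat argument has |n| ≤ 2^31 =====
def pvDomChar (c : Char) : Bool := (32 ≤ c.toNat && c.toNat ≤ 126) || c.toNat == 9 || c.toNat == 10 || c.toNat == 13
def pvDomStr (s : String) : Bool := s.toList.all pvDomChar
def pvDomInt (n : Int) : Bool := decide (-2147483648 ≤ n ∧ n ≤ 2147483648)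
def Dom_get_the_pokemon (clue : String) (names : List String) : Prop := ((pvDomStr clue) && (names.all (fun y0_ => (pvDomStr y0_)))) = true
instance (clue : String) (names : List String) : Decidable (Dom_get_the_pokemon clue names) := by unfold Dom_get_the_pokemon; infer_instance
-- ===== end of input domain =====

-- B rephrases A: instead of testing each name against the whole clue with an inner
-- zip/break loop, B walks the clue's positions once, narrowing a working candidate list
-- at each position (objective: alternative decomposition; same cost).

-- ===== PORT A =====
-- inner 'for i,j in zip(clue,name): if i not in [j,'_']: break / else: append'
def pvInnerA : List (Char × Char) → Bool
  | [] => true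
  | (i, j) :: rest => if ¬(i = j ∨ i = '_') then false else pvInnerA rest

def get_the_pokemon (clue : String) (names : List String) : List String :=
  names.foldl (fun acc name =>
    if pvInnerA (clue.toList.zip name.toList) then acc ++ [name] else acc) []

-- ===== PORT B =====
-- one list-comprehension pass of Source B: keep n with len(n) <= i or c == '_' or n[i] == c
def pvFilterStep (i : Nat) (c : Char) (cands : List String) : List String :=
  cands.filter (fun n => decide (n.toList.length ≤ i) || c == '_' || n.toList.getD i ' ' == c)

-- the 'for i, c in enumerate(clue)' loop of Source B
def pvLoopB : Nat → List Char → List String → List String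
  | _, [], cands => cands
  | i, c :: rest, cands => pvLoopB (i + 1) rest (pvFilterStep i c cands)

def get_the_pokemon_alt (clue : String) (names : List String) : List String :=
  let limit := min clue.toList.length ((names.map (fun n => n.toList.length)).foldl max 0)
  pvLoopB 0 (clue.toList.take limit) names

-- ===== PRECONDITION & SPEC =====
def Spec_get_the_pokemon (clue : String) (names : List String) (out : List String) : Prop := out = get_the_pokemon_alt clue names
instance (clue : String) (names : List String) (out : List String) : Decidable (Spec_get_the_pokemon clue names out) := by unfold Spec_get_the_pokemon; infer_instance

-- ===== CLAIM (what is proved, stated in full; the proofs are below) =====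
def Claim_equal_get_the_pokemon : Prop := ∀ (clue : String) (names : List String), Dom_get_the_pokemon clue names → Spec_get_the_pokemon clue names (get_the_pokemon clue names)

-- ===== LEMMAS AND PROOFS =====

-- the residual test B applies to a name from clue position i onwards
def pvKeepFrom (i : Nat) : List Char → List Char → Bool
  | [], _ => true
  | c :: cs, l =>
      (decide (l.length ≤ i) || c == '_' || l.getD i ' ' == c) && pvKeepFrom (i + 1) cs l

theorem pvKeepFrom_of_short (cs l : List Char) (i : Nat) (h : l.length ≤ i) :
    pvKeepFrom i cs l = true := by
  induction cs generalizing i with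
  | nil => rfl
  | cons c cs ih =>
      simp [pvKeepFrom, h]
      exact ih (i + 1) (by omega)

theorem pvKeepFrom_eq_innerA (cs l : List Char) (i : Nat) :
    pvKeepFrom i cs l = pvInnerA (cs.zip (l.drop i)) := by
  induction cs generalizing i with
  | nil => rfl
  | cons c cs ih =>
      by_cases h : l.length ≤ i
      · rw [List.drop_eq_nil_of_le h]
        simp [pvInnerA, pvKeepFrom, h, pvKeepFrom_of_short cs l (i + 1) (by omega)]
      · have hi : i < l.length := by omega
        rw [List.drop_eq_getElem_cons hi]
        simp only [List.zip_cons_cons, pvInnerA, pvKeepFrom, ih (i + 1),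
          List.getD_eq_getElem l ' ' hi]
        by_cases h1 : c = l[i]
        · subst h1; simp [h]
        · by_cases h2 : c = '_'
          · subst h2; simp [h, h1]
          · simp [h, h1, h2, Ne.symm h1]

-- positions past a name's length never reject it: truncating the clue at k ≥ len(l) - i changes nothing
theorem pvKeepFrom_take (cs : List Char) (l : List Char) (i k : Nat) (h : l.length ≤ i + k) :
    pvKeepFrom i (cs.take k) l = pvKeepFrom i cs l := by
  induction cs generalizing i k with
  | nil => simp
  | cons c cs ih =>
      cases k with
      | zero =>
          simp only [List.take_zero, pvKeepFrom]
          exact (pvKeepFrom_of_short (c :: cs) l i (by omega)).symm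
      | succ k =>
          simp only [List.take_succ_cons, pvKeepFrom]
          rw [ih (i + 1) k (by omega)]

theorem pvLoopB_eq_filter (cs : List Char) (i : Nat) (cands : List String) :
    pvLoopB i cs cands = cands.filter (fun n => pvKeepFrom i cs n.toList) := by
  induction cs generalizing i cands with
  | nil => simp [pvLoopB, pvKeepFrom]
  | cons c cs ih =>
      rw [pvLoopB, ih, pvFilterStep, List.filter_filter]
      simp only [pvKeepFrom, Bool.and_comm]

-- ===== VERDICT (by name: the statement is the Claim_ definition above) =====
theorem get_the_pokemon_spec : Claim_equal_get_the_pokemon := by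
  intro clue names _
  unfold Spec_get_the_pokemon get_the_pokemon get_the_pokemon_alt
  rw [PySem.List.foldl_append_ite_eq_filter, pvLoopB_eq_filter]
  simp only [List.nil_append]
  apply List.filter_congr
  intro n hn
  have hlen : n.toList.length ≤ (names.map (fun n => n.toList.length)).foldl max 0 :=
    (PySem.List.le_foldl_max (names.map (fun n => n.toList.length)) 0).2 _
      (List.mem_map_of_mem hn)
  by_cases hc : clue.toList.length ≤ (names.map (fun n => n.toList.length)).foldl max 0
  · rw [min_eq_left hc, List.take_of_length_le le_rfl, pvKeepFrom_eq_innerA]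
    simp
  · rw [min_eq_right (Nat.le_of_not_le hc), pvKeepFrom_take _ _ 0 _ (by omega),
      pvKeepFrom_eq_innerA]
    simp
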